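-- pv_equiv track=rewrite | github.com/atkinssamuel/DataStructures | heaps/max_heap.py | insert_max_heap
-- ===== SOURCE A (Python) =====
-- import math
--
-- def get_parent(index):
--     return math.floor((index - 1)/2)
--
-- def insert_max_heap(array, element):
--     array.append(element)
--
--     current_index = len(array) - 1
--     parent_index = get_parent(current_index)
--
--     while current_index != 0:
--         if array[current_index] > array[parent_index]:
--             array[current_index], array[parent_index] = array[parent_index], array[current_index]
--             current_index = parent_index
--             parent_index = get_parent(current_index)
--         else:
--             return array
--
--     return array
-- ===== SOURCE B (Python) =====
-- def insert_max_heap(array, element):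
--     array.append(element)
--     # pass 1: materialize the ancestor index chain leaf -> root
--     chain = [len(array) - 1]
--     while chain[-1] != 0:
--         chain.append((chain[-1] - 1) // 2)
--     # pass 2: find the insertion depth k along the chain
--     k = 0
--     while k + 1 < len(chain) and array[chain[k + 1]] < element:
--         k += 1
--     # pass 3: block-shift the first k ancestors down, then place the element once
--     for j in range(1, k + 1):
--         array[chain[j - 1]] = array[chain[j]]
--     array[chain[k]] = element
--     return array
-- ===== Notes on version B (the rewrite author's own statement) =====
-- stated objective: alternative
-- what changed: B replaces A's single interleaved compare-and-swap sift-up loop with three staged passes: it first materializes the full ancestor index chain of the new slot, then scans that chain once to find the insertion depth k, then block-shifts the first k ancestors down and writes the element exactly once.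
import Mathlib
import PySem

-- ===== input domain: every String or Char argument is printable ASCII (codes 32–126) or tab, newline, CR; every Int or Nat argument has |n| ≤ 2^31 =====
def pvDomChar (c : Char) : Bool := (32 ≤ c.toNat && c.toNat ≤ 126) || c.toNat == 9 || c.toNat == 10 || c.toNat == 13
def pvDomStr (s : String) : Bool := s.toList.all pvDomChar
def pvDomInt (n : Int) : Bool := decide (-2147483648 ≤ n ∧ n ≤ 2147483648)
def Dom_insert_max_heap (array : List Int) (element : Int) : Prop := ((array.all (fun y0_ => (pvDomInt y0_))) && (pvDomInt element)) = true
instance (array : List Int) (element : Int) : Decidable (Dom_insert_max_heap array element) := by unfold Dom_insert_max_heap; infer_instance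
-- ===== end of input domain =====

-- B replaces A's interleaved compare-and-swap sift-up with three staged passes
-- (ancestor chain, depth scan, block shift); same return value. Note: both Python
-- versions mutate `array` in place; the equivalence proved here is about the RETURN value.

-- ===== PORT A =====
-- A's indices are always ≥ 0 and < len(array) by construction (cur starts at len-1 and moves
-- to parent (cur-1)//2 only while cur ≠ 0), so Python indexing never raises and Nat indices
-- with List.getD transcribe it exactly; math.floor((i-1)/2) = (i-1)//2 = Nat (cur-1)/2 for cur ≥ 1.
def insertLoopA (arr : List Int) (cur : Nat) : List Int :=
  if cur = 0 then arr
  else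
    let par := (cur - 1) / 2
    if arr.getD cur 0 > arr.getD par 0 then
      insertLoopA ((arr.set cur (arr.getD par 0)).set par (arr.getD cur 0)) par
    else arr
termination_by cur
decreasing_by have := Nat.div_le_self (cur - 1) 2; omega

def insert_max_heap (array : List Int) (element : Int) : List Int :=
  let arr := array ++ [element]
  insertLoopA arr (arr.length - 1)

-- ===== PORT B =====
-- pass 1: the ancestor index chain [n, parent, ..., 0] of the appended slot
def buildChain (cur : Nat) : List Nat :=
  if cur = 0 then [0] else cur :: buildChain ((cur - 1) / 2)
termination_by cur
decreasing_by have := Nat.div_le_self (cur - 1) 2; omega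

-- pass 2: k = 0; while k+1 < len(chain) and array[chain[k+1]] < element: k += 1
def findDepth (arr : List Int) (e : Int) : List Nat → Nat
  | [] => 0
  | [_] => 0
  | _ :: p :: rest => if arr.getD p 0 < e then 1 + findDepth arr e (p :: rest) else 0

-- pass 3: for j in range(1, k+1): array[chain[j-1]] = array[chain[j]]
def shiftLoop (arr : List Int) (chain : List Nat) (k : Nat) : List Int :=
  match k with
  | 0 => arr
  | Nat.succ k' =>
    let a := shiftLoop arr chain k'
    a.set (chain.getD k' 0) (a.getD (chain.getD (k' + 1) 0) 0)

def insert_max_heap_alt (array : List Int) (element : Int) : List Int :=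
  let arr := array ++ [element]
  let chain := buildChain (arr.length - 1)
  let k := findDepth arr element chain
  (shiftLoop arr chain k).set (chain.getD k 0) element

-- ===== PRECONDITION & SPEC =====
def Spec_insert_max_heap (array : List Int) (element : Int) (out : List Int) : Prop := out = insert_max_heap_alt array element
instance (array : List Int) (element : Int) (out : List Int) : Decidable (Spec_insert_max_heap array element out) := by unfold Spec_insert_max_heap; infer_instance

-- ===== CLAIM =====
def Claim_equal_insert_max_heap : Prop := ∀ (array : List Int) (element : Int), Dom_insert_max_heap array element → Spec_insert_max_heap array element (insert_max_heap array element)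

-- ===== LEMMAS AND PROOFS =====

theorem set_getD_self (l : List Int) (i : Nat) (v : Int) (h : i < l.length) (hv : l.getD i 0 = v) :
    l.set i v = l := by
  have : l[i] = v := by simpa [List.getD, List.getElem?_eq_getElem h] using hv
  subst this
  simp

theorem chain_le : ∀ (m : Nat), ∀ i ∈ buildChain m, i ≤ m := by
  intro m
  induction m using Nat.strong_induction_on with
  | _ m ih =>
    rw [buildChain]
    by_cases h0 : m = 0
    · simp [h0]
    · simp only [if_neg h0, List.mem_cons]
      rintro i (rfl | hi)
      · exact le_refl _
      · have hlt : (m - 1) / 2 < m := by have := Nat.div_le_self (m - 1) 2; omega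
        exact le_trans (ih _ hlt i hi) (le_of_lt hlt)

theorem chain_head (m : Nat) : ∃ rest, buildChain m = m :: rest := by
  by_cases h0 : m = 0
  · exact ⟨[], by rw [buildChain]; simp [h0]⟩
  · exact ⟨buildChain ((m - 1) / 2), by rw [buildChain, if_neg h0]⟩

theorem chain_tail_lt (m : Nat) (rest : List Nat) (h : buildChain m = m :: rest) :
    ∀ i ∈ rest, i < m := by
  rw [buildChain] at h
  by_cases h0 : m = 0
  · simp [h0] at h
    simp [h]
  · simp only [if_neg h0, List.cons.injEq] at h
    intro i hi
    rw [← h.2] at hi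
    have hlt : (m - 1) / 2 < m := by have := Nat.div_le_self (m - 1) 2; omega
    exact lt_of_le_of_lt (chain_le _ i hi) hlt

theorem findDepth_congr : ∀ (c : List Nat) (arr arr' : List Int) (e : Int),
    (∀ i ∈ c.tail, arr.getD i 0 = arr'.getD i 0) → findDepth arr e c = findDepth arr' e c := by
  intro c
  induction c with
  | nil => intro _ _ _ _; rfl
  | cons a t ih =>
    intro arr arr' e hag
    cases t with
    | nil => rfl
    | cons p rest =>
      have hp : arr.getD p 0 = arr'.getD p 0 := hag p (by simp)
      have hrest : ∀ i ∈ (p :: rest).tail, arr.getD i 0 = arr'.getD i 0 := by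
        intro i hi; exact hag i (by simp at hi ⊢; right; exact hi)
      simp only [findDepth, hp, ih arr arr' e hrest]

theorem shift_cons (a : Nat) (c : List Nat) : ∀ (kk : Nat) (arr : List Int),
    shiftLoop arr (a :: c) (kk + 1) = shiftLoop (arr.set a (arr.getD (c.getD 0 0) 0)) c kk := by
  intro kk
  induction kk with
  | zero => intro arr; simp [shiftLoop]
  | succ n ih =>
    intro arr
    show (shiftLoop arr (a :: c) (n + 1)).set ((a :: c).getD (n + 1) 0)
          ((shiftLoop arr (a :: c) (n + 1)).getD ((a :: c).getD (n + 2) 0) 0)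
        = (shiftLoop (arr.set a (arr.getD (c.getD 0 0) 0)) c n).set (c.getD n 0)
          ((shiftLoop (arr.set a (arr.getD (c.getD 0 0) 0)) c n).getD (c.getD (n + 1) 0) 0)
    rw [ih arr]
    simp [List.getD]

theorem main_agree (e : Int) : ∀ (cur : Nat) (arr : List Int), cur < arr.length → arr.getD cur 0 = e →
    insertLoopA arr cur =
      (shiftLoop arr (buildChain cur) (findDepth arr e (buildChain cur))).set
        ((buildChain cur).getD (findDepth arr e (buildChain cur)) 0) e := by
  intro cur
  induction cur using Nat.strong_induction_on with
  | _ cur ih =>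
    intro arr hlt hcur
    by_cases h0 : cur = 0
    · subst h0
      rw [insertLoopA, buildChain]
      simp only [if_pos rfl]
      exact (set_getD_self arr 0 e hlt hcur).symm
    · have hparlt : (cur - 1) / 2 < cur := by have := Nat.div_le_self (cur - 1) 2; omega
      set par := (cur - 1) / 2 with hpar
      obtain ⟨rest, hchainP⟩ := chain_head par
      have hbc : buildChain cur = cur :: par :: rest := by
        rw [buildChain, if_neg h0, ← hpar, hchainP]
      rw [insertLoopA, if_neg h0, ← hpar, hbc]
      have hparl : par < arr.length := lt_trans hparlt hlt
      set pv := arr.getD par 0 with hpv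
      by_cases hc : pv < e
      · -- A swaps and recurses; B shifts one more level.
        have hgt : arr.getD cur 0 > arr.getD par 0 := by rw [hcur, ← hpv]; exact hc
        rw [if_pos hgt, hcur]
        set arr' := (arr.set cur pv).set par e with harr'
        -- findDepth on the two-cons chain takes the positive branch
        have hfd : findDepth arr e (cur :: par :: rest)
            = 1 + findDepth arr e (par :: rest) := by
          simp only [findDepth, ← hpv, if_pos hc]
        -- arr and arr' agree on rest (indices < par < cur)
        have hagree : ∀ i ∈ (par :: rest).tail, arr.getD i 0 = arr'.getD i 0 := by
          intro i hi
          simp only [List.tail_cons] at hi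
          have hipar : i < par := chain_tail_lt par rest hchainP i hi
          rw [harr']
          simp [List.getD, List.getElem?_set_ne (by omega : cur ≠ i),
            List.getElem?_set_ne (by omega : par ≠ i)]
        have hfd' : findDepth arr e (par :: rest) = findDepth arr' e (par :: rest) := by
          rw [← hchainP] at *
          exact findDepth_congr _ arr arr' e hagree
        -- IH on par with arr'
        have harr'len : par < arr'.length := by rw [harr']; simpa using hparl
        have harr'get : arr'.getD par 0 = e := by
          have h2 : par < (arr.set cur pv).length := by simpa using hparl
          rw [harr']
          simp [List.getD, hparl]
        have hIH := ih par hparlt arr' harr'len harr'get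
        rw [hIH, hchainP]
        -- B side: peel one level of the shift
        rw [hfd, ← hchainP]
        rw [Nat.add_comm 1 _, shift_cons cur (buildChain par) _ arr]
        rw [hchainP]
        have hheadP : (buildChain par).getD 0 0 = par := by rw [hchainP]; rfl
        rw [← hchainP, hheadP, ← hpv, hchainP]
        -- goal: shiftLoop (arr.set cur pv) (par::rest) k' .set ((cur::par::rest).getD (k'+1)) e
        --     = shiftLoop arr' (par::rest) k'' .set ((par::rest).getD k'') e  with k' = k''
        rw [← hfd']
        set k' := findDepth arr e (par :: rest) with hk'
        have hidx : (cur :: par :: rest).getD (k' + 1) 0 = (par :: rest).getD k' 0 := rfl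
        rw [hidx]
        -- now compare the two shiftLoops; arrays differ only at par
        cases hk : k' with
        | zero =>
          simp only [shiftLoop, List.getD_cons_zero]
          rw [harr', List.set_set]
        | succ kk =>
          -- k' ≥ 1 forces rest ≠ []
          cases rest with
          | nil => simp [findDepth] at hk'; omega
          | cons r rs =>
            rw [shift_cons par (r :: rs) kk (arr.set cur pv),
                shift_cons par (r :: rs) kk arr']
            have hr : r < par := chain_tail_lt par _ hchainP r (by simp)
            have hvr : ((arr.set cur pv)).getD ((r :: rs).getD 0 0) 0
                = arr'.getD ((r :: rs).getD 0 0) 0 := by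
              rw [harr']
              simp [List.getD, List.getElem?_set_ne (by omega : par ≠ r)]
            rw [hvr, harr', List.set_set]
      · -- A stops; B's depth is 0 and the final write is a no-op.
        have hngt : ¬ arr.getD cur 0 > arr.getD par 0 := by rw [hcur, ← hpv]; exact hc
        rw [if_neg hngt]
        have hfd : findDepth arr e (cur :: par :: rest) = 0 := by
          simp only [findDepth, ← hpv, if_neg hc]
        rw [hfd]
        simp only [shiftLoop, List.getD_cons_zero]
        exact (set_getD_self arr cur e hlt hcur).symm

theorem set_append_last (l : List Int) (e : Int) : (l ++ [e]).getD l.length 0 = e := by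
  induction l with
  | nil => rfl
  | cons a t ih => simp

-- ===== VERDICT =====
theorem insert_max_heap_spec : Claim_equal_insert_max_heap := by
  intro array element _
  unfold Spec_insert_max_heap insert_max_heap insert_max_heap_alt
  have hlen : (array ++ [element]).length - 1 = array.length := by simp
  have hlt : array.length < (array ++ [element]).length := by simp
  simp only [hlen]
  exact main_agree element array.length (array ++ [element]) hlt (set_append_last array element)
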